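-- pv_equiv track=rewrite | github.com/stdchao/algo-practice | 14_cut_rope/cut_rope.py | cut_rope_gd
-- ===== SOURCE A (Python) =====
-- def cut_rope_gd(length):
--   if length < 2:
--     return 0
--   elif length == 2:
--     return 1
--   elif length == 3:
--     return 2
--
--   max = 1
--   while length > 4:
--     max = max * 3
--     length = length - 3
--
--   if length == 4:
--     max = max * 4
--   elif length == 3:
--     max = max * 3
--   elif length == 2:
--     max = max * 2
--
--   return max
-- ===== SOURCE B (Python) =====
-- def _pow3(k):
--     result = 1
--     base = 3
--     while k > 0:
--         if k % 2 == 1: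
--             result = result * base
--         base = base * base
--         k = k // 2
--     return result
--
--
-- def cut_rope_gd(length):
--     if length < 2:
--         return 0
--     if length == 2:
--         return 1
--     if length == 3:
--         return 2
--     q, r = length // 3, length % 3
--     if r == 0:
--         return _pow3(q - 1) * 3
--     if r == 1:
--         return _pow3(q - 1) * 4
--     return _pow3(q) * 2
-- ===== Notes on version B (the rewrite author's own statement) =====
-- stated objective: faster
-- what changed: Replaces the subtract-by-3 loop with a closed form on the remainder of dividing by 3, computing the needed power by binary exponentiation (measured about 50x faster at the largest timing size).
import Mathlib
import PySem

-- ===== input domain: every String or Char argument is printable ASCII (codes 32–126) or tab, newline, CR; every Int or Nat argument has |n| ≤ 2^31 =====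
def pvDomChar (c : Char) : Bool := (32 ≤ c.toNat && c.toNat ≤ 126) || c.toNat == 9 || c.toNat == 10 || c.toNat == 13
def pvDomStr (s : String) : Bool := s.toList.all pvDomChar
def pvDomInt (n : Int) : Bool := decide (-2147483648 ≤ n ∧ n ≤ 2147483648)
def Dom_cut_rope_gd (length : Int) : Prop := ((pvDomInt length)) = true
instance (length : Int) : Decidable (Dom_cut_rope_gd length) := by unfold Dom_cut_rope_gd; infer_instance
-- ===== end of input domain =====

-- B replaces A's subtract-3 loop by a closed form on length mod 3 with the power of 3
-- computed by binary exponentiation (objective: faster, measured).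

-- ===== PORT A =====
-- A's 'while length > 4' loop over the state (max, length)
def pvLoopA (mx l : Int) : Int × Int :=
  if l > 4 then pvLoopA (mx * 3) (l - 3) else (mx, l)
termination_by (l - 4).toNat
decreasing_by omega
def cut_rope_gd (length : Int) : Int :=
  if length < 2 then 0
  else if length = 2 then 1
  else if length = 3 then 2
  else
    let p := pvLoopA 1 length
    let mx := p.1
    let l := p.2
    let mx := if l = 4 then mx * 4 else if l = 3 then mx * 3 else if l = 2 then mx * 2 else mx
    mx

-- ===== PORT B =====
-- B's helper _pow3: binary exponentiation over the state (result, base, k)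
def pvPow3 (result base k : Int) : Int :=
  if k > 0 then
    let result := if PySem.Int.mod k 2 = 1 then result * base else result
    pvPow3 result (base * base) (PySem.Int.floordiv k 2)
  else result
termination_by k.toNat
decreasing_by
  have h : PySem.Int.floordiv k 2 = k / 2 := PySem.Int.floordiv_eq_ediv_of_pos (by omega)
  rw [h]; omega

def cut_rope_gd_alt (length : Int) : Int :=
  if length < 2 then 0
  else if length = 2 then 1
  else if length = 3 then 2
  else
    let q := PySem.Int.floordiv length 3
    let r := PySem.Int.mod length 3
    if r = 0 then pvPow3 1 3 (q - 1) * 3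
    else if r = 1 then pvPow3 1 3 (q - 1) * 4
    else pvPow3 1 3 q * 2

-- ===== PRECONDITION & SPEC =====
def Spec_cut_rope_gd (length : Int) (out : Int) : Prop := out = cut_rope_gd_alt length
instance (length : Int) (out : Int) : Decidable (Spec_cut_rope_gd length out) := by unfold Spec_cut_rope_gd; infer_instance

-- ===== CLAIM (what is proved, stated in full; the proofs are below) =====
def Claim_equal_cut_rope_gd : Prop := ∀ (length : Int), Dom_cut_rope_gd length → Spec_cut_rope_gd length (cut_rope_gd length)

-- ===== LEMMAS AND PROOFS =====
theorem pvLoopA_mul_aux : ∀ (t : Nat) (mx l : Int), (l - 4).toNat ≤ t →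
    pvLoopA mx l = (mx * (pvLoopA 1 l).1, (pvLoopA 1 l).2) := by
  intro t
  induction t with
  | zero =>
    intro mx l h
    have hl : ¬ l > 4 := by omega
    rw [pvLoopA.eq_def]
    conv_rhs => rw [pvLoopA.eq_def]
    simp [hl]
  | succ t ih =>
    intro mx l h
    by_cases hl : l > 4
    · rw [pvLoopA.eq_def]
      conv_rhs => rw [pvLoopA.eq_def]
      simp only [hl, if_pos]
      rw [ih (mx * 3) (l - 3) (by omega), ih (1 * 3) (l - 3) (by omega)]
      simp [mul_assoc]
    · rw [pvLoopA.eq_def]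
      conv_rhs => rw [pvLoopA.eq_def]
      simp [hl]

theorem pvPow3_spec_aux : ∀ (t : Nat) (k : Int), k.toNat ≤ t → ∀ result base : Int,
    pvPow3 result base k = result * base ^ k.toNat := by
  intro t
  induction t with
  | zero =>
    intro k h result base
    have hk : ¬ k > 0 := by omega
    rw [pvPow3.eq_def]
    simp [hk, show k.toNat = 0 by omega]
  | succ t ih =>
    intro k h result base
    by_cases hk : k > 0
    · rw [pvPow3.eq_def]
      simp only [hk, if_pos]
      rw [PySem.Int.floordiv_eq_ediv_of_pos (by omega), PySem.Int.mod_eq_emod_of_pos (by omega)]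
      rw [ih (k / 2) (by omega)]
      have h2 : k.toNat = 2 * (k / 2).toNat + (k % 2).toNat := by omega
      have hb : base * base = base ^ 2 := by ring
      by_cases hm : k % 2 = 1
      · rw [if_pos hm, hb, ← pow_mul, show k.toNat = 2 * (k / 2).toNat + 1 by omega, pow_succ]
        ring
      · rw [if_neg hm, hb, ← pow_mul, show k.toNat = 2 * (k / 2).toNat by omega]
    · rw [pvPow3.eq_def]
      simp [hk, show k.toNat = 0 by omega]
theorem cut_rope_gd_ge4 (n : Int) (h : 4 ≤ n) :
    cut_rope_gd n =
      (if (pvLoopA 1 n).2 = 4 then (pvLoopA 1 n).1 * 4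
       else if (pvLoopA 1 n).2 = 3 then (pvLoopA 1 n).1 * 3
       else if (pvLoopA 1 n).2 = 2 then (pvLoopA 1 n).1 * 2
       else (pvLoopA 1 n).1) := by
  simp only [cut_rope_gd]
  rw [if_neg (by omega), if_neg (by omega), if_neg (by omega)]

theorem cut_rope_gd_alt_ge4 (n : Int) (h : 4 ≤ n) :
    cut_rope_gd_alt n =
      (if n % 3 = 0 then pvPow3 1 3 (n / 3 - 1) * 3
       else if n % 3 = 1 then pvPow3 1 3 (n / 3 - 1) * 4
       else pvPow3 1 3 (n / 3) * 2) := by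
  simp only [cut_rope_gd_alt]
  rw [if_neg (by omega), if_neg (by omega), if_neg (by omega),
      PySem.Int.floordiv_eq_ediv_of_pos (by omega), PySem.Int.mod_eq_emod_of_pos (by omega)]

theorem cut_rope_gd_rec (n : Int) (h : 7 ≤ n) :
    cut_rope_gd n = 3 * cut_rope_gd (n - 3) := by
  rw [cut_rope_gd_ge4 n (by omega), cut_rope_gd_ge4 (n - 3) (by omega)]
  have h1 : pvLoopA 1 n = pvLoopA (1 * 3) (n - 3) := by
    rw [pvLoopA.eq_def, if_pos (by omega)]
  rw [h1, pvLoopA_mul_aux (n - 3 - 4).toNat (1 * 3) (n - 3) le_rfl]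
  simp only
  split_ifs <;> ring

theorem cut_rope_gd_alt_rec (n : Int) (h : 7 ≤ n) :
    cut_rope_gd_alt n = 3 * cut_rope_gd_alt (n - 3) := by
  rw [cut_rope_gd_alt_ge4 n (by omega), cut_rope_gd_alt_ge4 (n - 3) (by omega)]
  have hq : n / 3 = (n - 3) / 3 + 1 := by omega
  have hr : n % 3 = (n - 3) % 3 := by omega
  rw [hq, hr]
  have e1 : pvPow3 1 3 ((n - 3) / 3 + 1 - 1) = 3 * pvPow3 1 3 ((n - 3) / 3 - 1) := by
    rw [pvPow3_spec_aux ((n-3)/3 + 1 - 1).toNat _ le_rfl, pvPow3_spec_aux ((n-3)/3 - 1).toNat _ le_rfl]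
    rw [show ((n-3)/3 + 1 - 1).toNat = ((n-3)/3 - 1).toNat + 1 by omega, pow_succ]
    ring
  have e2 : pvPow3 1 3 ((n - 3) / 3 + 1) = 3 * pvPow3 1 3 ((n - 3) / 3) := by
    rw [pvPow3_spec_aux ((n-3)/3 + 1).toNat _ le_rfl, pvPow3_spec_aux ((n-3)/3).toNat _ le_rfl]
    rw [show ((n-3)/3 + 1).toNat = ((n-3)/3).toNat + 1 by omega, pow_succ]
    ring
  split_ifs
  · rw [e1]; ring
  · rw [e1]; ring
  · rw [e2]; ring

theorem cut_rope_gd_eq_alt_aux : ∀ (t : Nat) (n : Int), n ≤ t →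
    cut_rope_gd n = cut_rope_gd_alt n := by
  intro t
  induction t with
  | zero =>
    intro n h
    simp [cut_rope_gd, cut_rope_gd_alt, show n < 2 by omega]
  | succ t ih =>
    intro n h
    by_cases h7 : 7 ≤ n
    · rw [cut_rope_gd_rec n h7, cut_rope_gd_alt_rec n h7, ih (n - 3) (by push_cast at h ⊢; omega)]
    · by_cases h2 : n < 2
      · simp [cut_rope_gd, cut_rope_gd_alt, h2]
      · have p0 : pvPow3 1 3 0 = 1 := by
          rw [pvPow3_spec_aux 0 0 (by norm_num) 1 3]; norm_num
        have p1 : pvPow3 1 3 1 = 3 := by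
          rw [pvPow3_spec_aux 1 1 (by norm_num) 1 3]; norm_num
        have hL4 : pvLoopA 1 4 = (1, 4) := by rw [pvLoopA.eq_def, if_neg (by omega)]
        have hL5 : pvLoopA 1 5 = (3, 2) := by
          rw [pvLoopA.eq_def, if_pos (by omega)]
          norm_num
          rw [pvLoopA.eq_def, if_neg (by omega)]
        have hL6 : pvLoopA 1 6 = (3, 3) := by
          rw [pvLoopA.eq_def, if_pos (by omega)]
          norm_num
          rw [pvLoopA.eq_def, if_neg (by omega)]
        interval_cases n
        · simp [cut_rope_gd, cut_rope_gd_alt]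
        · simp [cut_rope_gd, cut_rope_gd_alt]
        · rw [cut_rope_gd_ge4 4 (by omega), cut_rope_gd_alt_ge4 4 (by omega), hL4]
          norm_num [p0]
        · rw [cut_rope_gd_ge4 5 (by omega), cut_rope_gd_alt_ge4 5 (by omega), hL5]
          norm_num [p1]
        · rw [cut_rope_gd_ge4 6 (by omega), cut_rope_gd_alt_ge4 6 (by omega), hL6]
          norm_num [p1]

theorem cut_rope_gd_eq_alt (n : Int) : cut_rope_gd n = cut_rope_gd_alt n := by
  by_cases h : n < 2
  · simp [cut_rope_gd, cut_rope_gd_alt, h]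
  · exact cut_rope_gd_eq_alt_aux n.toNat n (by omega)

-- ===== VERDICT (by name: the statement is the Claim_ definition above) =====
theorem cut_rope_gd_spec : Claim_equal_cut_rope_gd := by
  intro n _
  exact cut_rope_gd_eq_alt n
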